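-- pv_equiv track=rewrite | github.com/saisankargochhayat/algo_quest | Company-Based/hackerrank/ques3.py | maxBalancedTeams
-- ===== SOURCE A (Python) =====
-- def maxBalancedTeams(developers, maxNewHires):
--     maxCount = 0
--     developers.sort() # We sort developers to figure out where to add.
--     for i in range(len(developers)-1, -1, -1):
--         newCopy = maxNewHires
--         curr = 0
--         pointer, pVal = i, developers[i]
--         while (pVal - developers[pointer]) <= newCopy and pointer >= 0:
--             curr += 1
--             newCopy -= (pVal - developers[pointer])
--             pointer -= 1
--         if curr == len(developers):
--             return curr
--         maxCount = max(maxCount, curr)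
--     return maxCount
-- ===== SOURCE B (Python) =====
-- # B: sort once, then a single left-to-right pass; for each right end a binary
-- # search on prefix sums finds the smallest feasible window start (O(n log n)
-- # vs A's O(n^2)). Return value only: A sorts its argument in place, B does not.
-- def maxBalancedTeams(developers, maxNewHires):
--     devs = sorted(developers)
--     n = len(devs)
--     prefix = [0]
--     total = 0
--     for d in devs:
--         total += d
--         prefix.append(total)
--     best = 0
--     for r in range(n):
--         pval = devs[r]
--         lo, hi = 0, r + 1
--         while lo < hi:
--             mid = (lo + hi) // 2
--             if pval * (r - mid + 1) - (prefix[r + 1] - prefix[mid]) <= maxNewHires: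
--                 hi = mid
--             else:
--                 lo = mid + 1
--         best = max(best, r - lo + 1)
--     return best
-- ===== Notes on version B (the rewrite author's own statement) =====
-- stated objective: faster
-- what changed: Replaces A's per-index backward rescan (an inner while loop re-walking the array for every right end) by one sort, a prefix-sum array, and a binary search for the smallest feasible window start at each right end.
import Mathlib
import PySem

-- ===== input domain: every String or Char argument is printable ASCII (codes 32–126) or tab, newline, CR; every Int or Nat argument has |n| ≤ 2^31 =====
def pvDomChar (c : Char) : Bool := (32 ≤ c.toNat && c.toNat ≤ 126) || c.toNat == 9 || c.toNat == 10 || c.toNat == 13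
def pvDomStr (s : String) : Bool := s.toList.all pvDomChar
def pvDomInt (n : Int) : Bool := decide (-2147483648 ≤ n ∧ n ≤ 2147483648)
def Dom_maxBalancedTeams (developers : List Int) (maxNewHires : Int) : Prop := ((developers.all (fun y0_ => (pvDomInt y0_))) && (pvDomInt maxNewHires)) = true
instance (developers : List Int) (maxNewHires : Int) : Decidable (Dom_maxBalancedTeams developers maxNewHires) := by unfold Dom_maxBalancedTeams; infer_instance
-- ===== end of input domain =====

-- B replaces A's per-index backward rescan by sort + prefix sums + binary search
-- (objective: faster). Return value only: Python A sorts its argument in place, B does not.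


-- ===== PORT A =====
-- the `while (pVal - developers[pointer]) <= newCopy and pointer >= 0` loop;
-- `none` would be Python's IndexError, unreachable from maxBalancedTeams (the list is
-- nonempty whenever the loop runs and pointer ≥ -1, so devs[pointer] always exists)
-- fuel only bounds the iteration count (the loop body runs at most pointer + 2 times,
-- since pointer decreases by 1 per iteration and the loop stops at pointer = -1);
-- the caller passes enough fuel, so the fuel-0 branch is never taken
def pvInnerA (devs : List Int) (pVal : Int) : Nat → Int → Int → Int → Int
  | 0, _, _, curr => curr
  | fuel + 1, newCopy, pointer, curr =>
    match PySem.List.pyGet? devs pointer with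
    | none => curr
    | some v =>
      if pVal - v ≤ newCopy ∧ 0 ≤ pointer then
        pvInnerA devs pVal fuel (newCopy - (pVal - v)) (pointer - 1) (curr + 1)
      else curr

-- the `for i in range(len(developers)-1, -1, -1)` loop with its early return;
-- devs[i] always exists for the indices the caller passes, so `.getD 0` is exact
def pvOuterA (devs : List Int) (maxNewHires : Int) : List Int → Int → Int
  | [], maxCount => maxCount
  | i :: rest, maxCount =>
    let pVal := (PySem.List.pyGet? devs i).getD 0
    let curr := pvInnerA devs pVal ((i + 2).toNat) maxNewHires i 0
    if curr = (devs.length : Int) then curr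
    else pvOuterA devs maxNewHires rest (max maxCount curr)

def maxBalancedTeams (developers : List Int) (maxNewHires : Int) : Int :=
  let devs := PySem.List.sorted developers (fun x => x)
  pvOuterA devs maxNewHires (PySem.List.pyRange ((devs.length : Int) - 1) (-1) (-1)) 0

-- ===== PORT B =====
-- the `while lo < hi` binary search of Source B; prefix[r+1], prefix[mid] always exist
-- at the call sites, so `.getD 0` is exact
-- fuel only bounds the iteration count (hi - lo shrinks by at least 1 per iteration,
-- so hi - lo iterations suffice); the caller passes enough fuel
def pvBSearchB (pfx : List Int) (m pval r : Int) : Nat → Int → Int → Int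
  | 0, lo, _ => lo
  | fuel + 1, lo, hi =>
    if lo < hi then
      let mid := PySem.Int.floordiv (lo + hi) 2
      if pval * (r - mid + 1) -
          ((PySem.List.pyGet? pfx (r + 1)).getD 0 - (PySem.List.pyGet? pfx mid).getD 0) ≤ m then
        pvBSearchB pfx m pval r fuel lo mid
      else
        pvBSearchB pfx m pval r fuel (mid + 1) hi
    else lo

def maxBalancedTeams_alt (developers : List Int) (maxNewHires : Int) : Int :=
  let devs := PySem.List.sorted developers (fun x => x)
  let n := devs.length
  -- `prefix = [0]; total = 0; for d in devs: total += d; prefix.append(total)`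
  let pfx := (devs.foldl (fun (acc : List Int × Int) d => (acc.1 ++ [acc.2 + d], acc.2 + d)) ([0], 0)).1
  -- `for r in range(n): … best = max(best, r - lo + 1)`
  (PySem.List.pyRange 0 (n : Int) 1).foldl
    (fun best r =>
      let pval := (PySem.List.pyGet? devs r).getD 0
      let lo := pvBSearchB pfx maxNewHires pval r ((r + 1).toNat) 0 (r + 1)
      max best (r - lo + 1)) 0

-- ===== PRECONDITION & SPEC =====
def Spec_maxBalancedTeams (developers : List Int) (maxNewHires : Int) (out : Int) : Prop := out = maxBalancedTeams_alt developers maxNewHires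
instance (developers : List Int) (maxNewHires : Int) (out : Int) : Decidable (Spec_maxBalancedTeams developers maxNewHires out) := by unfold Spec_maxBalancedTeams; infer_instance

-- ===== CLAIM (what is proved, stated in full; the proofs are below) =====
def Claim_equal_maxBalancedTeams : Prop := ∀ (developers : List Int) (maxNewHires : Int), Dom_maxBalancedTeams developers maxNewHires → Spec_maxBalancedTeams developers maxNewHires (maxBalancedTeams developers maxNewHires)

-- ===== LEMMAS AND PROOFS =====

-- devs[i] as the total value both ports use at in-range indices
def pvEl (s : List Int) (i : Int) : Int := (PySem.List.pyGet? s i).getD 0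

lemma pvEl_eq_getElem (s : List Int) (i : Int) (h0 : 0 ≤ i) (h1 : i < (s.length : Int)) :
    pvEl s i = s[i.toNat]'(by omega) := by
  simp [pvEl, PySem.List.pyGet?_eq_some_getElem s h0 h1]

-- cost of raising the window s[l..r] to pV, summed element by element from the left
def pvWAux (s : List Int) (pV : Int) : Nat → Int → Int
  | 0, _ => 0
  | k + 1, l => (pV - pvEl s l) + pvWAux s pV k (l + 1)

def pvW (s : List Int) (pV : Int) (l r : Int) : Int := pvWAux s pV (r + 1 - l).toNat l

lemma pvW_stop (s : List Int) (pV : Int) {l r : Int} (h : r < l) : pvW s pV l r = 0 := by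
  unfold pvW
  rw [show (r + 1 - l).toNat = 0 by omega]
  rfl

lemma pvW_step (s : List Int) (pV : Int) {l r : Int} (h : l ≤ r) :
    pvW s pV l r = (pV - pvEl s l) + pvW s pV (l + 1) r := by
  unfold pvW
  rw [show (r + 1 - l).toNat = (r + 1 - (l + 1)).toNat + 1 by omega]
  rfl

lemma pvEl_mono {s : List Int} (hs : s.Pairwise (· ≤ ·)) {i j : Int}
    (h0 : 0 ≤ i) (hij : i ≤ j) (hj : j < (s.length : Int)) : pvEl s i ≤ pvEl s j := by
  rw [pvEl_eq_getElem s i h0 (by omega), pvEl_eq_getElem s j (by omega) hj]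
  rcases lt_or_eq_of_le hij with h | h
  · exact (List.pairwise_iff_getElem.mp hs) i.toNat j.toNat (by omega) (by omega) (by omega)
  · subst h; rfl

-- on a sorted list each step of pvW with pV = s[r] is nonnegative
lemma pvW_succ_le {s : List Int} (hs : s.Pairwise (· ≤ ·)) {l r : Int}
    (h0 : 0 ≤ l) (hr : r < (s.length : Int)) :
    pvW s (pvEl s r) (l + 1) r ≤ pvW s (pvEl s r) l r := by
  by_cases hlr : l ≤ r
  · rw [pvW_step s _ hlr]
    have := pvEl_mono hs h0 hlr hr
    omega
  · rw [pvW_stop s _ (by omega), pvW_stop s _ (by omega)]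

-- hence pvW is antitone in the left end of the window
lemma pvW_mono {s : List Int} (hs : s.Pairwise (· ≤ ·)) {l l' r : Int}
    (h0 : 0 ≤ l) (hll : l ≤ l') (hr : r < (s.length : Int)) :
    pvW s (pvEl s r) l' r ≤ pvW s (pvEl s r) l r := by
  have key : ∀ (k : Nat) (a : Int), 0 ≤ a →
      pvW s (pvEl s r) (a + (k : Int)) r ≤ pvW s (pvEl s r) a r := by
    intro k
    induction k with
    | zero => intro a _; simp
    | succ k ih =>
      intro a ha
      have h1 := ih (a + 1) (by omega)
      have h2 := pvW_succ_le hs ha hr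
      have e : a + ((k : Int) + 1) = (a + 1) + (k : Int) := by ring
      calc pvW s (pvEl s r) (a + ((k : Nat) + 1 : Nat)) r
          = pvW s (pvEl s r) ((a + 1) + (k : Int)) r := by rw [← e]; norm_num
        _ ≤ pvW s (pvEl s r) (a + 1) r := h1
        _ ≤ pvW s (pvEl s r) a r := h2
  have := key (l' - l).toNat l h0
  rwa [show l + ((l' - l).toNat : Int) = l' by omega] at this

-- window feasibility: the cost of raising s[l..r] to s[r] fits in the budget m
def pvQ (s : List Int) (m r l : Int) : Prop := pvW s (pvEl s r) l r ≤ m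

-- the boundary both loops compute: windows [l..r] with l ≥ lo are feasible, those with l < lo are not
def pvBnd (s : List Int) (m r lo : Int) : Prop :=
  0 ≤ lo ∧ lo ≤ r + 1 ∧ (∀ l, lo ≤ l → l ≤ r → pvQ s m r l) ∧ (∀ l, 0 ≤ l → l < lo → ¬ pvQ s m r l)

lemma pvBnd_unique {s : List Int} {m r lo₁ lo₂ : Int}
    (h₁ : pvBnd s m r lo₁) (h₂ : pvBnd s m r lo₂) : lo₁ = lo₂ := by
  obtain ⟨a1, b1, c1, d1⟩ := h₁
  obtain ⟨a2, b2, c2, d2⟩ := h₂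
  by_contra hne
  rcases lt_or_gt_of_ne hne with h | h
  · exact d2 lo₁ a1 h (c1 lo₁ le_rfl (by omega))
  · exact d1 lo₂ a2 h (c2 lo₂ le_rfl (by omega))

-- A's inner while loop computes the boundary (any sufficient fuel)
lemma pvInnerA_bnd {s : List Int} (hs : s.Pairwise (· ≤ ·)) {m r : Int}
    (hr0 : 0 ≤ r) (hrn : r < (s.length : Int)) :
    ∀ (p c : Int) (fuel : Nat), -1 ≤ p → p ≤ r → (p + 2).toNat ≤ fuel →
      (∀ l, p < l → l ≤ r → pvQ s m r l) →
      ∃ lo, pvBnd s m r lo ∧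
        pvInnerA s (pvEl s r) fuel (m - pvW s (pvEl s r) (p + 1) r) p c = c + (p + 1 - lo) := by
  suffices h : ∀ (k : Nat) (p c : Int) (fuel : Nat), (p + 1).toNat = k → -1 ≤ p → p ≤ r →
      (p + 2).toNat ≤ fuel → (∀ l, p < l → l ≤ r → pvQ s m r l) →
      ∃ lo, pvBnd s m r lo ∧
        pvInnerA s (pvEl s r) fuel (m - pvW s (pvEl s r) (p + 1) r) p c = c + (p + 1 - lo) by
    exact fun p c fuel h1 h2 h3 h4 => h (p + 1).toNat p c fuel rfl h1 h2 h3 h4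
  intro k
  induction k with
  | zero =>
    intro p c fuel hk hp1 hpr hfuel hin
    have hp : p = -1 := by omega
    subst hp
    obtain ⟨f, rfl⟩ : ∃ f, fuel = f + 1 := ⟨fuel - 1, by omega⟩
    refine ⟨0, ⟨le_rfl, by omega, fun l hl1 hl2 => hin l (by omega) hl2,
      fun l hl1 hl2 => absurd hl2 (by omega)⟩, ?_⟩
    rw [pvInnerA]
    split
    · omega
    · rw [if_neg (by rintro ⟨-, h2⟩; omega)]; omega
  | succ k ih =>
    intro p c fuel hk hp1 hpr hfuel hin
    have hp0 : 0 ≤ p := by omega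
    obtain ⟨f, rfl⟩ : ∃ f, fuel = f + 1 := ⟨fuel - 1, by omega⟩
    have hget := PySem.List.pyGet?_eq_some_getElem s hp0 (by omega : p < (s.length : Int))
    have hwstep : pvW s (pvEl s r) p r = (pvEl s r - pvEl s p) + pvW s (pvEl s r) (p + 1) r :=
      pvW_step s _ (by omega)
    rw [pvInnerA]
    split
    · rename_i heq; rw [hget] at heq; cases heq
    · rename_i v heq
      have hv : v = pvEl s p := by simp [pvEl, heq]
      by_cases hQ : pvQ s m r p
      · rw [if_pos ⟨by unfold pvQ at hQ; omega, hp0⟩]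
        have e : m - pvW s (pvEl s r) (p + 1) r - (pvEl s r - v) =
            m - pvW s (pvEl s r) (p - 1 + 1) r := by
          rw [show p - 1 + 1 = p by ring, hwstep, hv]; ring
        rw [e]
        obtain ⟨lo, hbnd, hrec⟩ := ih (p - 1) (c + 1) f (by omega) (by omega) (by omega) (by omega)
          (by intro l hl1 hl2
              rcases lt_or_ge (p : Int) l with h | h
              · exact hin l h hl2
              · have hlp : l = p := by omega
                subst hlp; exact hQ)
        exact ⟨lo, hbnd, by rw [hrec]; ring⟩
      · rw [if_neg (by rintro ⟨h1, -⟩; exact hQ (by unfold pvQ; omega))]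
        refine ⟨p + 1, ⟨by omega, by omega, fun l hl1 hl2 => hin l (by omega) hl2, ?_⟩, by ring⟩
        intro l hl0 hlp hQl
        have := pvW_mono hs hl0 (show l ≤ p by omega) hrn
        unfold pvQ at hQ hQl
        omega

-- closed form of pvW l r via prefix sums, 0 ≤ l ≤ r+1
lemma pvW_closed {s : List Int} {pV : Int} {r : Int} (hrn : r < (s.length : Int)) :
    ∀ (l : Int), 0 ≤ l → l ≤ r + 1 →
      pvW s pV l r = pV * (r - l + 1) - ((s.take (r + 1).toNat).sum - (s.take l.toNat).sum) := by
  suffices h : ∀ (k : Nat) (l : Int), (r + 1 - l).toNat = k → 0 ≤ l → l ≤ r + 1 →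
      pvW s pV l r = pV * (r - l + 1) - ((s.take (r + 1).toNat).sum - (s.take l.toNat).sum) by
    exact fun l h1 h2 => h _ l rfl h1 h2
  intro k
  induction k with
  | zero =>
    intro l hk h0 h1
    have hl : l = r + 1 := by omega
    subst hl
    rw [pvW_stop s _ (by omega)]
    ring
  | succ k ih =>
    intro l hk h0 h1
    have hlr : l ≤ r := by omega
    rw [pvW_step s _ hlr, ih (l + 1) (by omega) (by omega) (by omega)]
    have hlt : l.toNat < s.length := by omega
    have hsum : (s.take (l.toNat + 1)).sum = (s.take l.toNat).sum + s[l.toNat] :=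
      List.sum_take_succ s l.toNat hlt
    have he : pvEl s l = s[l.toNat] := pvEl_eq_getElem s l h0 (by omega)
    have h2 : (l + 1).toNat = l.toNat + 1 := by omega
    rw [h2, hsum, he]
    have : pV * (r - l + 1) = pV * (r - (l + 1) + 1) + pV := by ring
    linarith

-- B's binary search computes the boundary (any sufficient fuel)
lemma pvBSearchB_bnd {s pfx : List Int} (hs : s.Pairwise (· ≤ ·)) {m r : Int}
    (hr0 : 0 ≤ r) (hrn : r < (s.length : Int))
    (hpfx : ∀ k : Int, 0 ≤ k → k ≤ (s.length : Int) → pvEl pfx k = (s.take k.toNat).sum) :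
    ∀ (fuel : Nat) (lo hi : Int), 0 ≤ lo → lo ≤ hi → hi ≤ r + 1 → (hi - lo).toNat ≤ fuel →
      (∀ l, 0 ≤ l → l < lo → ¬ pvQ s m r l) → (∀ l, hi ≤ l → l ≤ r → pvQ s m r l) →
      pvBnd s m r (pvBSearchB pfx m (pvEl s r) r fuel lo hi) := by
  intro fuel
  induction fuel with
  | zero =>
    intro lo hi h0 hlohi hhir hf inv1 inv2
    have hhi : hi ≤ lo := by omega
    show pvBnd s m r lo
    exact ⟨h0, by omega, fun l hl1 hl2 => inv2 l (by omega) hl2, inv1⟩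
  | succ f ih =>
    intro lo hi h0 hlohi hhir hf inv1 inv2
    rw [pvBSearchB]
    by_cases hlt : lo < hi
    · rw [if_pos hlt]
      have h1 := PySem.Int.floordiv_mul_add_mod (lo + hi) 2
      have h2 := PySem.Int.mod_nonneg (lo + hi) (b := 2) (by omega)
      have h3 := PySem.Int.mod_lt (lo + hi) (b := 2) (by omega)
      show pvBnd s m r
        (if pvEl s r * (r - PySem.Int.floordiv (lo + hi) 2 + 1) -
            ((PySem.List.pyGet? pfx (r + 1)).getD 0 -
              (PySem.List.pyGet? pfx (PySem.Int.floordiv (lo + hi) 2)).getD 0) ≤ m then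
          pvBSearchB pfx m (pvEl s r) r f lo (PySem.Int.floordiv (lo + hi) 2)
        else pvBSearchB pfx m (pvEl s r) r f (PySem.Int.floordiv (lo + hi) 2 + 1) hi)
      set mid := PySem.Int.floordiv (lo + hi) 2 with hmiddef
      have hmlo : lo ≤ mid := by omega
      have hmhi : mid < hi := by omega
      have e1 : (PySem.List.pyGet? pfx (r + 1)).getD 0 = (s.take (r + 1).toNat).sum :=
        hpfx (r + 1) (by omega) (by omega)
      have e2 : (PySem.List.pyGet? pfx mid).getD 0 = (s.take mid.toNat).sum :=
        hpfx mid (by omega) (by omega)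
      have ecost : pvEl s r * (r - mid + 1) -
          ((PySem.List.pyGet? pfx (r + 1)).getD 0 - (PySem.List.pyGet? pfx mid).getD 0) =
          pvW s (pvEl s r) mid r := by
        rw [e1, e2, pvW_closed hrn mid (by omega) (by omega)]
      rw [ecost]
      by_cases hcost : pvW s (pvEl s r) mid r ≤ m
      · rw [if_pos hcost]
        exact ih lo mid h0 hmlo (by omega) (by omega) inv1
          (by intro l hl1 hl2
              have := pvW_mono hs (show (0:Int) ≤ mid by omega) hl1 hrn
              unfold pvQ
              omega)
      · rw [if_neg hcost]
        exact ih (mid + 1) hi (by omega) (by omega) hhir (by omega)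
          (by intro l hl0 hlm hQl
              have := pvW_mono hs hl0 (show l ≤ mid by omega) hrn
              unfold pvQ at hQl
              omega)
          inv2
    · rw [if_neg hlt]
      have : lo = hi := by omega
      exact ⟨h0, by omega, fun l hl1 hl2 => inv2 l (by omega) hl2, inv1⟩

-- the prefix-building loop of B produces the list of running sums
lemma pvPfx_fold : ∀ (ds pre : List Int) (t : Int),
    (ds.foldl (fun (acc : List Int × Int) d => (acc.1 ++ [acc.2 + d], acc.2 + d)) (pre, t)).1 =
      pre ++ (List.range ds.length).map (fun k => t + (ds.take (k + 1)).sum) := by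
  intro ds
  induction ds with
  | nil => simp
  | cons d tl ih =>
    intro pre t
    simp only [List.foldl_cons]
    rw [ih]
    simp only [List.length_cons, List.range_succ_eq_map, List.map_cons, List.map_map]
    simp [List.take_succ_cons, Function.comp, add_assoc]

lemma pvPfx_get (s : List Int) :
    ∀ k : Int, 0 ≤ k → k ≤ (s.length : Int) →
      pvEl ((s.foldl (fun (acc : List Int × Int) d => (acc.1 ++ [acc.2 + d], acc.2 + d)) ([0], 0)).1) k =
        (s.take k.toNat).sum := by
  intro k h0 h1
  rw [pvPfx_fold]
  obtain ⟨j, hj⟩ : ∃ j : Nat, k = (j : Int) := ⟨k.toNat, by omega⟩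
  subst hj
  rw [show ([(0 : Int)] ++ (List.range s.length).map (fun k => 0 + (s.take (k + 1)).sum)) =
      ((0 : Int) :: (List.range s.length).map (fun k => 0 + (s.take (k + 1)).sum)) by simp]
  cases j with
  | zero => simp [pvEl]
  | succ j =>
    have hjn : j < s.length := by omega
    rw [pvEl, show ((j + 1 : Nat) : Int) = ((j : Nat) : Int) + 1 by push_cast; ring,
      PySem.List.pyGet?_cons_succ, PySem.List.pyGet?_natCast]
    simp [hjn]

-- a fold of running maxima over entries all ≤ c stays at c
lemma pvFoldMax_le {f : Int → Int} : ∀ (l : List Int) (c : Int), (∀ i ∈ l, f i ≤ c) →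
    l.foldl (fun a i => max a (f i)) c = c := by
  intro l
  induction l with
  | nil => intro c _; rfl
  | cons i rest ih =>
    intro c h
    simp only [List.foldl_cons]
    rw [max_eq_left (h i (by simp))]
    exact ih c (fun j hj => h j (by simp [hj]))

-- A's outer loop (with its early return) is the running max of the per-index window sizes
lemma pvOuterA_eq {s : List Int} {m : Int}
    (hsz : ∀ i : Int, 0 ≤ i → i < (s.length : Int) →
      0 ≤ pvInnerA s (pvEl s i) ((i + 2).toNat) m i 0 ∧ pvInnerA s (pvEl s i) ((i + 2).toNat) m i 0 ≤ (s.length : Int)) :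
    ∀ (is : List Int) (mc : Int), (∀ i ∈ is, 0 ≤ i ∧ i < (s.length : Int)) →
      mc ≤ (s.length : Int) →
      pvOuterA s m is mc = is.foldl (fun a i => max a (pvInnerA s (pvEl s i) ((i + 2).toNat) m i 0)) mc := by
  intro is
  induction is with
  | nil => intro mc _ _; rfl
  | cons i rest ih =>
    intro mc hmem hmc
    obtain ⟨hi0, hin⟩ := hmem i (by simp)
    rw [pvOuterA]
    simp only [List.foldl_cons]
    by_cases hfull : pvInnerA s ((PySem.List.pyGet? s i).getD 0) ((i + 2).toNat) m i 0 = (s.length : Int)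
    · rw [if_pos hfull]
      have hfull' : pvInnerA s (pvEl s i) ((i + 2).toNat) m i 0 = (s.length : Int) := hfull
      rw [hfull']
      rw [max_eq_right hmc]
      rw [pvFoldMax_le rest (s.length : Int)
        (fun j hj => (hsz j (hmem j (by simp [hj])).1 (hmem j (by simp [hj])).2).2)]
      exact hfull
    · rw [if_neg hfull]
      have : max mc (pvInnerA s ((PySem.List.pyGet? s i).getD 0) ((i + 2).toNat) m i 0) =
          max mc (pvInnerA s (pvEl s i) ((i + 2).toNat) m i 0) := rfl
      rw [this]
      exact ih (max mc (pvInnerA s (pvEl s i) ((i + 2).toNat) m i 0)) (fun j hj => hmem j (by simp [hj]))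
        (by have := (hsz i hi0 hin).2; omega)

-- ===== VERDICT (by name: the statement is the Claim_ definition above) =====
theorem maxBalancedTeams_spec : Claim_equal_maxBalancedTeams := by
  unfold Claim_equal_maxBalancedTeams Spec_maxBalancedTeams
  intro developers m _hdom
  unfold maxBalancedTeams maxBalancedTeams_alt
  set s : List Int := PySem.List.sorted developers (fun x => x) with hsdef
  have hs : s.Pairwise (· ≤ ·) := PySem.List.sorted_pairwise developers (fun x => x)
  have hpfx := pvPfx_get s
  -- per-index: A's inner loop size = r + 1 - boundary = B's r - lo + 1
  have hsize : ∀ r : Int, 0 ≤ r → r < (s.length : Int) →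
      ∃ lo, pvBnd s m r lo ∧ pvInnerA s (pvEl s r) ((r + 2).toNat) m r 0 = r + 1 - lo := by
    intro r hr0 hrn
    obtain ⟨lo, hbnd, heq⟩ := pvInnerA_bnd hs hr0 hrn r 0 ((r + 2).toNat) (by omega) le_rfl le_rfl
      (fun l h1 h2 => absurd h2 (by omega))
    rw [pvW_stop s _ (by omega)] at heq
    rw [show m - 0 = m by ring] at heq
    exact ⟨lo, hbnd, by rw [heq]; ring⟩
  have hsz : ∀ i : Int, 0 ≤ i → i < (s.length : Int) →
      0 ≤ pvInnerA s (pvEl s i) ((i + 2).toNat) m i 0 ∧ pvInnerA s (pvEl s i) ((i + 2).toNat) m i 0 ≤ (s.length : Int) := by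
    intro i h0 h1
    obtain ⟨lo, ⟨a, b, -, -⟩, heq⟩ := hsize i h0 h1
    rw [heq]; omega
  rw [pvOuterA_eq hsz _ 0
    (by intro i hi
        rw [PySem.List.pyRange_neg_one_eq_reverse] at hi
        rw [List.mem_reverse] at hi
        have := PySem.List.mem_pyRange_one.mp hi
        omega)
    (by positivity)]
  rw [PySem.List.pyRange_neg_one_eq_reverse]
  rw [show (-1 : Int) + 1 = 0 by ring, show ((s.length : Int) - 1) + 1 = (s.length : Int) by ring]
  haveI : RightCommutative (fun (a : Int) (i : Int) => max a (pvInnerA s (pvEl s i) ((i + 2).toNat) m i 0)) :=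
    ⟨fun a x y => max_right_comm a _ _⟩
  rw [(List.reverse_perm (PySem.List.pyRange 0 (s.length : Int))).foldl_eq 0]
  refine PySem.List.foldl_congr_mem _ _ _ _ ?_
  intro acc r hr
  have hrb := PySem.List.mem_pyRange_one.mp hr
  obtain ⟨lo, hbndA, heqA⟩ := hsize r hrb.1 (by omega)
  have hbndB := pvBSearchB_bnd (m := m) hs hrb.1 (by omega) hpfx ((r + 1).toNat) 0 (r + 1)
    le_rfl (by omega) le_rfl (by omega)
    (fun l h1 h2 => absurd h2 (by omega)) (fun l h1 h2 => absurd h2 (by omega))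
  have hlo : lo = pvBSearchB
      ((s.foldl (fun (acc : List Int × Int) d => (acc.1 ++ [acc.2 + d], acc.2 + d)) ([0], 0)).1)
      m (pvEl s r) r ((r + 1).toNat) 0 (r + 1) := pvBnd_unique hbndA hbndB
  show max acc (pvInnerA s (pvEl s r) ((r + 2).toNat) m r 0) = max acc (r -
    pvBSearchB ((List.foldl (fun (acc : List Int × Int) d => (acc.1 ++ [acc.2 + d], acc.2 + d)) ([0], 0) s).1)
      m (pvEl s r) r ((r + 1).toNat) 0 (r + 1) + 1)
  rw [heqA, hlo]
  congr 1
  ring
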